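-- pv_equiv track=rewrite | github.com/HartBlanc/Unscrabble | Board.py | place_split
-- ===== SOURCE A (Python) =====
-- def place_split(word):
--     listy = []
--     if '.' in word:
--         for i, letter in enumerate(word):
--             if letter == '.':
--                 continue
--             if i < len(word) - 1:
--                 if word[i + 1] == '.':
--                     letter += '.'
--             listy.append(letter)
--     else:
--         listy = list(word)
--     return listy
-- ===== SOURCE B (Python) =====
-- import re
--
-- def place_split(word):
--     return re.findall(r'[^.]\.?', word)
-- ===== Notes on version B (the rewrite author's own statement) =====
-- stated objective: idiomatic
-- what changed: Replaces the dot-precheck plus index-lookahead loop with a single regex scan re.findall(r'[^.]\.?'), which pairs each non-dot character with an optional immediately-following dot.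
import Mathlib
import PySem

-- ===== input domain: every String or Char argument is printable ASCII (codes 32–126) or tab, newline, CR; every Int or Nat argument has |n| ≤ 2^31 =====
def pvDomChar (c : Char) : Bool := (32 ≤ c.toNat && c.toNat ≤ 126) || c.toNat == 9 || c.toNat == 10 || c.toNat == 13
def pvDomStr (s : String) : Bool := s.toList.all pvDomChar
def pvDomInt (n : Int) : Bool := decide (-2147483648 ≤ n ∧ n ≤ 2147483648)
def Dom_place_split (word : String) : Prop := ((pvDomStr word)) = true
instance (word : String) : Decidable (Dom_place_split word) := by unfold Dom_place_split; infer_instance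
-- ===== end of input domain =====

-- B replaces A's dot-precheck and index-lookahead loop by a regex-style scan
-- (re.findall(r'[^.]\.?')): each non-dot char, with an immediately-following dot attached.


-- ===== PORT A =====
-- the 'for i, letter in enumerate(word)' loop: index-carrying recursion over the chars,
-- lookahead word[i+1] ported as PySem.List.pyGet? on the full char list
def pvLoopA (cs : List Char) : Nat → List Char → List String → List String
  | _, [], listy => listy
  | i, letter :: rem, listy =>
    if letter = '.' then pvLoopA cs (i + 1) rem listy
    else
      let l : String :=
        if (i : Int) < (cs.length : Int) - 1 then
          if PySem.List.pyGet? cs ((i : Int) + 1) = some '.' then String.mk [letter, '.']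
          else String.mk [letter]
        else String.mk [letter]
      pvLoopA cs (i + 1) rem (listy ++ [l])

def place_split (word : String) : List String :=
  let cs := word.toList
  if '.' ∈ cs then pvLoopA cs 0 cs []
  else cs.map (fun c => String.mk [c])

-- ===== PORT B =====
-- re.findall(r'[^.]\.?', word): a match starts on each non-dot char and consumes an
-- optional dot right after it; dots that start no match are skipped
def pvScan : List Char → List String
  | [] => []
  | c :: rest =>
    if c = '.' then pvScan rest
    else if rest.head? = some '.' then String.mk [c, '.'] :: pvScan rest.tail
    else String.mk [c] :: pvScan rest
termination_by cs => cs.length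
decreasing_by all_goals (simp_all [List.length_tail]; try omega)

def place_split_alt (word : String) : List String := pvScan word.toList

-- ===== PRECONDITION & SPEC =====
def Spec_place_split (word : String) (out : List String) : Prop := out = place_split_alt word
instance (word : String) (out : List String) : Decidable (Spec_place_split word out) := by unfold Spec_place_split; infer_instance

-- ===== CLAIM (what is proved, stated in full; the proofs are below) =====
def Claim_equal_place_split : Prop := ∀ (word : String), Dom_place_split word → Spec_place_split word (place_split word)

-- ===== LEMMAS AND PROOFS =====
-- A's loop, read off positionally: keep each non-dot char, attaching the dot that follows it
def pvAout : List Char → List String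
  | [] => []
  | c :: rest =>
    if c = '.' then pvAout rest
    else (if rest.head? = some '.' then String.mk [c, '.'] else String.mk [c]) :: pvAout rest

theorem pvLoopA_eq (cs : List Char) : ∀ (rem : List Char) (i : Nat) (acc : List String),
    cs.drop i = rem → pvLoopA cs i rem acc = acc ++ pvAout rem := by
  intro rem
  induction rem with
  | nil => intro i acc _; simp [pvLoopA, pvAout]
  | cons c rest ih =>
    intro i acc hdrop
    have hi : i < cs.length := by
      by_contra h
      simp [List.drop_eq_nil_of_le (Nat.le_of_not_lt h)] at hdrop
    have hdrop' : cs.drop (i + 1) = rest := by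
      have := congrArg (List.drop 1) hdrop
      simpa [List.drop_drop, Nat.add_comm] using this
    have hlen : cs.length = i + 1 + rest.length := by
      have := congrArg List.length hdrop
      simp [List.length_drop] at this
      omega
    have hget : cs[i+1]? = rest.head? := by
      have h0 : (cs.drop (i+1))[0]? = rest[0]? := by rw [hdrop']
      rw [List.getElem?_drop] at h0
      simpa [List.head?_eq_getElem?] using h0
    by_cases hc : c = '.'
    · subst hc
      rw [pvLoopA, if_pos rfl, ih (i + 1) acc hdrop']
      simp [pvAout]
    · rw [pvLoopA, if_neg hc]
      simp only []
      rw [ih (i + 1) _ hdrop']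
      have hcast : ((i : Int) + 1) = ((i + 1 : Nat) : Int) := by push_cast; ring
      rw [pvAout, if_neg hc]
      by_cases hr : rest = []
      · subst hr
        have : ¬ ((i : Int) < (cs.length : Int) - 1) := by
          simp at hlen; omega
        simp [this, List.append_assoc]
      · have hlt : (i : Int) < (cs.length : Int) - 1 := by
          have : 0 < rest.length := List.length_pos_iff.mpr hr
          omega
        have hpg : PySem.List.pyGet? cs ((i : Int) + 1) = rest.head? := by
          rw [hcast, PySem.List.pyGet?_natCast, hget]
        simp [if_pos hlt, hpg]

theorem pvAout_eq_pvScan : ∀ (cs : List Char), pvAout cs = pvScan cs := by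
  intro cs
  induction cs using pvScan.induct with
  | case1 => simp [pvAout, pvScan]
  | case2 rest ih => simp [pvAout, pvScan, ih]
  | case3 c rest hc hd ih =>
    obtain ⟨t, ht⟩ : ∃ t, rest = '.' :: t := by
      cases rest with
      | nil => simp at hd
      | cons x xs => simp at hd; exact ⟨xs, by simp [hd]⟩
    subst ht
    simp only [List.tail_cons] at ih
    rw [pvAout, if_neg hc, pvScan, if_neg hc]
    simp [pvAout, ih]
  | case4 c rest hc hd ih =>
    rw [pvAout, if_neg hc, pvScan, if_neg hc, if_neg hd, if_neg hd, ih]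

theorem pvScan_no_dot : ∀ (cs : List Char), '.' ∉ cs →
    cs.map (fun c => String.mk [c]) = pvScan cs := by
  intro cs
  induction cs with
  | nil => simp [pvScan]
  | cons c rest ih =>
    intro h
    have hc : c ≠ '.' := fun e => h (by simp [e])
    have hr : '.' ∉ rest := fun e => h (by simp [e])
    have hd : rest.head? ≠ some '.' := by
      intro e
      exact hr (List.mem_of_mem_head? (by simp [e]))
    rw [pvScan, if_neg hc, if_neg hd, List.map_cons, ih hr]

-- ===== VERDICT (by name: the statement is the Claim_ definition above) =====
theorem place_split_spec : Claim_equal_place_split := by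
  intro word _
  unfold Spec_place_split place_split place_split_alt
  by_cases h : '.' ∈ word.toList
  · simp only [if_pos h]
    rw [pvLoopA_eq word.toList word.toList 0 [] (by simp), pvAout_eq_pvScan]
    simp
  · simp only [if_neg h]
    exact pvScan_no_dot word.toList h
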